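-- pv_equiv track=rewrite | github.com/LayanJethwa/led-weather-station | neon_matrix.py | num_size
-- ===== SOURCE A (Python) =====
-- def num_size(num):
--     size = 0
--     for i in range(len(num)):
--         if num[i] == '.' :
--             size += 4
--         elif num[i] == '1':
--             size += 2
--         else:
--             size += 5
--
--         if i != len(num)-1:
--             size += 1
--     return size
-- ===== SOURCE B (Python) =====
-- def num_size(num):
--     widths = 5*len(num) - num.count('.') - 3*num.count('1')
--     return widths + (len(num) - 1 if num else 0)
-- ===== Notes on version B (the rewrite author's own statement) =====
-- stated objective: faster
-- what changed: Replaces the per-character accumulating loop with a closed-form arithmetic expression over character counts (5*len minus discounts for '.' and '1', plus len-1 separators for non-empty input), using str.count instead of any Python-level loop.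
import Mathlib
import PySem

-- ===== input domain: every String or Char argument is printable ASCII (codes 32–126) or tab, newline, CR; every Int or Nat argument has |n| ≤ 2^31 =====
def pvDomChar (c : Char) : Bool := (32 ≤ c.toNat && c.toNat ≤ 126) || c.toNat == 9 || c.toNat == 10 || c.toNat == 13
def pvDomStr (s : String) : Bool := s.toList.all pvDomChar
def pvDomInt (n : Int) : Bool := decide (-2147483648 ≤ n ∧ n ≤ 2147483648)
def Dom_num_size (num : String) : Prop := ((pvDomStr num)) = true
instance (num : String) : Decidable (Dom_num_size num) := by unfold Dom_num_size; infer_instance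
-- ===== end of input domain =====

-- B replaces A's per-character accumulating loop by a closed-form expression over
-- character counts (objective: simpler).

-- ===== PORT A =====
def num_size (num : String) : Int :=
  (PySem.List.pyRange 0 (PySem.Str.len num) 1).foldl
    (fun size i =>
      let c := PySem.List.pyGetD num.toList i ' '
      let size := if c = '.' then size + 4 else if c = '1' then size + 2 else size + 5
      if i ≠ PySem.Str.len num - 1 then size + 1 else size) 0

-- ===== PORT B =====
-- num.count('.') on a 1-character needle is exactly the character count List.count.
def num_size_alt (num : String) : Int :=
  let widths : Int :=
    5 * PySem.Str.len num - (num.toList.count '.' : Int) - 3 * (num.toList.count '1' : Int)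
  widths + (if num.toList ≠ [] then PySem.Str.len num - 1 else 0)

-- ===== PRECONDITION & SPEC =====
def Spec_num_size (num : String) (out : Int) : Prop := out = num_size_alt num
instance (num : String) (out : Int) : Decidable (Spec_num_size num out) := by unfold Spec_num_size; infer_instance

-- ===== CLAIM (what is proved, stated in full; the proofs are below) =====
def Claim_equal_num_size : Prop := ∀ (num : String), Dom_num_size num → Spec_num_size num (num_size num)

-- ===== LEMMAS AND PROOFS =====

-- pixel width of one character in A's loop
def pvW (c : Char) : Int := if c = '.' then 4 else if c = '1' then 2 else 5

-- B-side closed form of the "width + separator" fold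
lemma pv_fold_w (cs : List Char) (a : Int) :
    cs.foldl (fun acc x => acc + pvW x + 1) a
      = a + (5 * cs.length - cs.count '.' - 3 * cs.count '1') + cs.length := by
  induction cs generalizing a with
  | nil => simp
  | cons x t ih =>
    simp only [List.foldl_cons, ih, List.count_cons, List.length_cons]
    by_cases h1 : x = '.' <;> by_cases h2 : x = '1' <;>
      simp [pvW, h1, h2] <;> omega

-- A's fold on a non-empty string, peeled at the last character
lemma pv_A_append (ds : List Char) (c : Char) :
    (PySem.List.pyRange 0 (((ds ++ [c]).length : Nat) : Int) 1).foldl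
      (fun size i =>
        if i ≠ (((ds ++ [c]).length : Nat) : Int) - 1 then
          (if PySem.List.pyGetD (ds ++ [c]) i ' ' = '.' then size + 4
            else if PySem.List.pyGetD (ds ++ [c]) i ' ' = '1' then size + 2 else size + 5) + 1
        else
          if PySem.List.pyGetD (ds ++ [c]) i ' ' = '.' then size + 4
          else if PySem.List.pyGetD (ds ++ [c]) i ' ' = '1' then size + 2 else size + 5) 0
    = ds.foldl (fun acc x => acc + pvW x + 1) 0 + pvW c := by
  have hlen : (((ds ++ [c]).length : Nat) : Int) = (ds.length : Int) + 1 := by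
    simp
  rw [hlen, PySem.List.pyRange_one_succ_right (Int.natCast_nonneg _), List.foldl_append]
  have hfirst :
      (PySem.List.pyRange 0 ((ds.length : Nat) : Int) 1).foldl
        (fun size i =>
          if i ≠ (ds.length : Int) + 1 - 1 then
            (if PySem.List.pyGetD (ds ++ [c]) i ' ' = '.' then size + 4
              else if PySem.List.pyGetD (ds ++ [c]) i ' ' = '1' then size + 2 else size + 5) + 1
          else
            if PySem.List.pyGetD (ds ++ [c]) i ' ' = '.' then size + 4
            else if PySem.List.pyGetD (ds ++ [c]) i ' ' = '1' then size + 2 else size + 5) 0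
      = ds.foldl (fun acc x => acc + pvW x + 1) 0 := by
    rw [PySem.List.foldl_congr_mem
      (g := fun acc i => (fun (s : Int) (x : Char) => s + pvW x + 1) acc
            (PySem.List.pyGetD ds i ' '))]
    · exact PySem.List.foldl_pyRange_zero_pyGetD' ds ' '
        (fun (s : Int) (x : Char) => s + pvW x + 1) 0
    · intro acc i hi
      rw [PySem.List.mem_pyRange_one] at hi
      have hget : PySem.List.pyGetD (ds ++ [c]) i ' ' = PySem.List.pyGetD ds i ' ' := by
        rw [PySem.List.pyGetD_eq_getElem (ds ++ [c]) ' ' hi.1 (by simp; omega),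
            PySem.List.pyGetD_eq_getElem ds ' ' hi.1 (by exact_mod_cast hi.2),
            List.getElem_append_left]
      rw [hget, if_pos (by omega)]
      unfold pvW
      split_ifs <;> simp [*]
  rw [hfirst]
  simp only [List.foldl_cons, List.foldl_nil]
  rw [if_neg (by omega : ¬ ((ds.length : Int) ≠ (ds.length : Int) + 1 - 1))]
  have hlast : PySem.List.pyGetD (ds ++ [c]) ((ds.length : Nat) : Int) ' ' = c := by
    rw [PySem.List.pyGetD_natCast]
    simp [List.getD]
  rw [hlast]
  unfold pvW
  split_ifs <;> simp [*]

-- main list-level identity: A's loop equals B's closed form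
lemma pv_main (cs : List Char) :
    (PySem.List.pyRange 0 ((cs.length : Nat) : Int) 1).foldl
      (fun size i =>
        if i ≠ ((cs.length : Nat) : Int) - 1 then
          (if PySem.List.pyGetD cs i ' ' = '.' then size + 4
            else if PySem.List.pyGetD cs i ' ' = '1' then size + 2 else size + 5) + 1
        else
          if PySem.List.pyGetD cs i ' ' = '.' then size + 4
          else if PySem.List.pyGetD cs i ' ' = '1' then size + 2 else size + 5) 0
    = 5 * cs.length - (cs.count '.' : Int) - 3 * (cs.count '1' : Int)
        + (if cs ≠ [] then (cs.length : Int) - 1 else 0) := by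
  rcases List.eq_nil_or_concat cs with rfl | ⟨ds, c, rfl⟩
  · simp [PySem.List.pyRange_one_eq_nil]
  · simp only [List.concat_eq_append]
    rw [pv_A_append, pv_fold_w]
    rw [if_pos (by simp)]
    simp only [List.count_append, List.length_append, List.count_singleton,
      List.length_cons, List.length_nil]
    by_cases h1 : c = '.' <;> by_cases h2 : c = '1' <;>
      simp [pvW, h1, h2] <;> omega

-- ===== VERDICT (by name: the statement is the Claim_ definition above) =====
theorem num_size_spec : Claim_equal_num_size := by
  intro num _
  unfold Spec_num_size num_size num_size_alt
  simp only [PySem.Str.len_eq]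
  exact pv_main num.toList
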